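-- pv_equiv track=rewrite | github.com/ramazannbilen/python-exercise | edabit/03-medium/algebra-sequence-boxes.py | box_seq
-- ===== SOURCE A (Python) =====
-- def box_seq(step):
--     boxes = 0
--     for i in range(1, step + 1):
--         if i % 2 == 1:
--             boxes += 3
--         else:
--             boxes -= 1
--     return boxes
-- ===== SOURCE B (Python) =====
-- def box_seq(step):
--     n = max(step, 0)
--     return 3 * ((n + 1) // 2) - n // 2
-- ===== Notes on version B (the rewrite author's own statement) =====
-- stated objective: faster
-- what changed: Replaced the O(step) loop with a closed-form formula counting odds and evens in 1..step directly.
import Mathlib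
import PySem

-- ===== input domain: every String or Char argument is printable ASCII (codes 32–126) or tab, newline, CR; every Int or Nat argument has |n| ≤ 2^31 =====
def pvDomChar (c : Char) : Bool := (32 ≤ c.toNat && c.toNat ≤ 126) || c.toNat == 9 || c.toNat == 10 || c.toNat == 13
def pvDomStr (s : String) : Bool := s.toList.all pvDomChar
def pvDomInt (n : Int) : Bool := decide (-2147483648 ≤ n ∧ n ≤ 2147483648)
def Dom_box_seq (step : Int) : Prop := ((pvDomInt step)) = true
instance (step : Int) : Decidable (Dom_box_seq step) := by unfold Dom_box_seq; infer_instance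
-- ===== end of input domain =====

-- B replaces A's O(step) loop by an O(1) closed-form count of the odds and evens in 1..step.

-- ===== PORT A =====
def box_seq (step : Int) : Int :=
  (PySem.List.pyRange 1 (step + 1) 1).foldl
    (fun boxes i => if PySem.Int.mod i 2 = 1 then boxes + 3 else boxes - 1) 0

-- ===== PORT B =====
def box_seq_alt (step : Int) : Int :=
  let n := max step 0
  3 * PySem.Int.floordiv (n + 1) 2 - PySem.Int.floordiv n 2

-- ===== PRECONDITION & SPEC =====
def Spec_box_seq (step : Int) (out : Int) : Prop := out = box_seq_alt step
instance (step : Int) (out : Int) : Decidable (Spec_box_seq step out) := by unfold Spec_box_seq; infer_instance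

-- ===== CLAIM (what is proved, stated in full; the proofs are below) =====
def Claim_equal_box_seq : Prop := ∀ (step : Int), Dom_box_seq step → Spec_box_seq step (box_seq step)

-- ===== LEMMAS AND PROOFS =====

theorem box_seq_nat (n : Nat) :
    box_seq (n : Int) = 3 * PySem.Int.floordiv ((n : Int) + 1) 2 - PySem.Int.floordiv (n : Int) 2 := by
  induction n with
  | zero =>
    unfold box_seq
    rw [PySem.List.pyRange_one_eq_nil (by norm_num)]
    decide
  | succ m ih =>
    unfold box_seq at ih ⊢
    have : ((m : Int) + 1) + 1 = (1 : Int) + ((m + 1 : Nat) : Int) := by push_cast; ring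
    rw [show ((m + 1 : Nat) : Int) + 1 = ((m : Int) + 1) + 1 by push_cast; ring,
        PySem.List.pyRange_one_succ_right (by omega), List.foldl_append]
    simp only [List.foldl]
    rw [ih]
    have hm1 : PySem.Int.mod ((m : Int) + 1) 2 = ((m : Int) + 1) % 2 :=
      PySem.Int.mod_eq_emod_of_pos (by norm_num)
    have h1 : PySem.Int.floordiv ((m : Int) + 1) 2 = ((m : Int) + 1) / 2 :=
      PySem.Int.floordiv_eq_ediv_of_pos (by norm_num)
    have h2 : PySem.Int.floordiv (m : Int) 2 = (m : Int) / 2 :=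
      PySem.Int.floordiv_eq_ediv_of_pos (by norm_num)
    have h3 : PySem.Int.floordiv ((m : Int) + 1 + 1) 2 = ((m : Int) + 2) / 2 := by
      rw [show (m : Int) + 1 + 1 = (m : Int) + 2 by ring]
      exact PySem.Int.floordiv_eq_ediv_of_pos (by norm_num)
    rw [hm1, h1, h2]
    push_cast [h3]
    split_ifs with h
    · omega
    · omega

theorem box_seq_nonpos (step : Int) (h : step ≤ 0) : box_seq step = 0 := by
  unfold box_seq
  rw [PySem.List.pyRange_one_eq_nil (by omega)]
  rfl

-- ===== VERDICT (by name: the statement is the Claim_ definition above) =====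
theorem box_seq_spec : Claim_equal_box_seq := by
  intro step _
  unfold Spec_box_seq box_seq_alt
  by_cases h : 0 ≤ step
  · obtain ⟨n, rfl⟩ := Int.eq_ofNat_of_zero_le h
    rw [max_eq_left (by omega)]
    exact box_seq_nat n
  · rw [box_seq_nonpos step (by omega), max_eq_right (by omega)]
    decide
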